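-- pv_equiv track=rewrite | github.com/Korred/advent_of_code_2025 | day_04/task_2.py | nodes_to_remove
-- ===== SOURCE A (Python) =====
-- def nodes_to_remove(nodes: set[tuple[int, int]]) -> int:
--     accessible = set()
--     directions = [(0, 1), (1, 0), (0, -1), (-1, 0), (1, 1), (1, -1), (-1, 1), (-1, -1)]
--
--     for node in nodes:
--         count = 0
--         for dx, dy in directions:
--             neighbor = (node[0] + dx, node[1] + dy)
--             if neighbor in nodes:
--                 count += 1
--
--         if count < 4:
--             accessible.add(node)
--
--     return accessible
-- ===== SOURCE B (Python) =====
-- def nodes_to_remove(nodes):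
--     directions = [(0, 1), (1, 0), (0, -1), (-1, 0), (1, 1), (1, -1), (-1, 1), (-1, -1)]
--     incidence = {}
--     for x, y in nodes:
--         for dx, dy in directions:
--             p = (x + dx, y + dy)
--             incidence[p] = incidence.get(p, 0) + 1
--     return {node for node in nodes if incidence.get(node, 0) < 4}
-- ===== Notes on version B (the rewrite author's own statement) =====
-- stated objective: alternative
-- what changed: Replaces per-node membership queries over the 8 directions by a single incidence counter dict (node+d occurrences), exploiting the symmetry of the direction set, then a separate filter pass over the nodes.
import Mathlib
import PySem

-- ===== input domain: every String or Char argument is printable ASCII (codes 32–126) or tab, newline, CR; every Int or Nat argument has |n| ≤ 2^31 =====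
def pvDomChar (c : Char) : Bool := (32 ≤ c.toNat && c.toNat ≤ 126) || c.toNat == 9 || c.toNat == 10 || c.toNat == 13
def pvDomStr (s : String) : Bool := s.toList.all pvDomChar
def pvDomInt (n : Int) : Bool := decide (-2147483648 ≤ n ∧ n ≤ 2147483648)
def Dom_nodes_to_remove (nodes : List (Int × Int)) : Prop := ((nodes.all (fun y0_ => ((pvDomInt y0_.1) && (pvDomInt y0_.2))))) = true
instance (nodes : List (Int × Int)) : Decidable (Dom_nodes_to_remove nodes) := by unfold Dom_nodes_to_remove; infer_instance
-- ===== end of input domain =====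

-- B replaces A's per-node 8-direction membership test by an incidence counter
-- (one dict pass over nodes×directions, then a filter pass); alternative, not claimed faster.

-- ===== PORT A =====
def pvDirs : List (Int × Int) := [(0,1),(1,0),(0,-1),(-1,0),(1,1),(1,-1),(-1,1),(-1,-1)]

def nodes_to_remove (nodes : List (Int × Int)) : List (Int × Int) :=
  nodes.foldl (fun accessible node =>
    let count := pvDirs.foldl (fun c d =>
      if nodes.contains (node.1 + d.1, node.2 + d.2) then c + 1 else c) (0 : Int)
    if count < 4 then PySem.Set.add accessible node else accessible) PySem.Set.empty

-- ===== PORT B =====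
def nodes_to_remove_alt (nodes : List (Int × Int)) : List (Int × Int) :=
  let incidence := nodes.foldl (fun d node =>
    pvDirs.foldl (fun d dd =>
      let p := (node.1 + dd.1, node.2 + dd.2)
      d.insert p (d.getD p 0 + 1)) d) (PySem.Dict.empty : PySem.Dict (Int × Int) Int)
  nodes.foldl (fun acc node =>
    if incidence.getD node 0 < 4 then PySem.Set.add acc node else acc) PySem.Set.empty

-- ===== PRECONDITION & SPEC =====
-- Pre_: the Python argument is a set, so its element list is duplicate-free.
def Pre_nodes_to_remove (nodes : List (Int × Int)) : Prop := nodes.Nodup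
instance (nodes : List (Int × Int)) : Decidable (Pre_nodes_to_remove nodes) := by
  unfold Pre_nodes_to_remove; infer_instance
def pvWitness_nodes_to_remove : (List (Int × Int)) := [(0,0),(1,0),(5,5)]

def Spec_nodes_to_remove (nodes : List (Int × Int)) (out : List (Int × Int)) : Prop := out = nodes_to_remove_alt nodes
instance (nodes : List (Int × Int)) (out : List (Int × Int)) : Decidable (Spec_nodes_to_remove nodes out) := by unfold Spec_nodes_to_remove; infer_instance

-- ===== CLAIM (what is proved, stated in full; the proofs are below) =====
def Claim_equal_nodes_to_remove : Prop := ∀ (nodes : List (Int × Int)), Dom_nodes_to_remove nodes → Pre_nodes_to_remove nodes → Spec_nodes_to_remove nodes (nodes_to_remove nodes)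

-- ===== LEMMAS AND PROOFS =====

-- the 8 shifted points of a node, as B's inner loop produces them
def pvShifts (n : Int × Int) : List (Int × Int) :=
  pvDirs.map (fun d => (n.1 + d.1, n.2 + d.2))

lemma pv_foldl_flatMap {α β γ : Type} (l : List α) (F : α → List β) (g : γ → β → γ) (init : γ) :
    (l.flatMap F).foldl g init = l.foldl (fun acc x => (F x).foldl g acc) init := by
  induction l generalizing init with
  | nil => rfl
  | cons a t ih => simp [List.flatMap_cons, List.foldl_append, ih]

-- B's nested dict loop is the counter of the flatMap of shifts
lemma pv_incidence_eq (nodes : List (Int × Int)) :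
    (nodes.foldl (fun d node =>
      pvDirs.foldl (fun d dd =>
        d.insert (node.1 + dd.1, node.2 + dd.2)
          (d.getD (node.1 + dd.1, node.2 + dd.2) 0 + 1)) d)
      (PySem.Dict.empty : PySem.Dict (Int × Int) Int))
    = (nodes.flatMap pvShifts).foldl (fun d p => d.insert p (d.getD p 0 + 1)) PySem.Dict.empty := by
  rw [pv_foldl_flatMap]
  refine PySem.List.foldl_congr_mem _ _ _ _ ?_
  intro d n _
  simp [pvShifts, List.foldl_map]

-- symmetry of pvDirs: counting d with m+d = v equals counting d with v+d = m
lemma pv_countP_symm (m v : Int × Int) :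
    pvDirs.countP (fun d => decide ((m.1 + d.1, m.2 + d.2) = v))
    = pvDirs.countP (fun d => decide ((v.1 + d.1, v.2 + d.2) = m)) := by
  have hperm : (pvDirs.map (fun d => (-d.1, -d.2))).Perm pvDirs := by decide
  rw [← hperm.countP_eq (fun d => decide ((v.1 + d.1, v.2 + d.2) = m)), List.countP_map]
  refine List.countP_congr ?_
  intro d _
  simp [Prod.ext_iff]
  omega

-- count of v among a node's 8 shifts, as a countP over pvDirs
lemma pv_count_shifts (m v : Int × Int) :
    (pvShifts m).count v = pvDirs.countP (fun d => decide ((m.1 + d.1, m.2 + d.2) = v)) := by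
  simp only [pvShifts, List.count, List.countP_map]
  refine List.countP_congr ?_
  intro d _
  simp [Function.comp]

-- membership in m :: t splits a countP when m ∉ t
lemma pv_countP_mem_cons (l : List (Int × Int)) (g : (Int × Int) → (Int × Int))
    (m : Int × Int) (t : List (Int × Int)) (hm : m ∉ t) :
    l.countP (fun d => decide (g d ∈ m :: t))
    = l.countP (fun d => decide (g d = m)) + l.countP (fun d => decide (g d ∈ t)) := by
  induction l with
  | nil => simp
  | cons a l ih =>
    simp only [List.countP_cons, ih]
    by_cases h1 : g a = m
    · simp [h1, hm]
      omega
    · by_cases h2 : g a ∈ t <;> simp [h1, h2, List.mem_cons] <;> omega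

-- MAIN: for duplicate-free nodes the incidence count at v equals A's neighbour count at v
lemma pv_count_flatMap (nodes : List (Int × Int)) (v : Int × Int) (h : nodes.Nodup) :
    (nodes.flatMap pvShifts).count v
    = pvDirs.countP (fun d => decide ((v.1 + d.1, v.2 + d.2) ∈ nodes)) := by
  induction nodes with
  | nil => simp
  | cons m t ih =>
    rcases List.nodup_cons.mp h with ⟨hm, ht⟩
    rw [List.flatMap_cons, List.count_append, pv_count_shifts, pv_countP_symm, ih ht,
      pv_countP_mem_cons _ _ _ _ hm]

-- A's inner loop is that countP (as an Int)
lemma pv_acount_eq (nodes : List (Int × Int)) (node : Int × Int) :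
    (pvDirs.foldl (fun c d =>
      if nodes.contains (node.1 + d.1, node.2 + d.2) then c + 1 else c) (0 : Int))
    = (pvDirs.countP (fun d => decide ((node.1 + d.1, node.2 + d.2) ∈ nodes)) : Int) := by
  rw [PySem.List.foldl_if_add_one]
  simp

-- B's dict lookup is the flatMap count (as an Int)
lemma pv_bcount_eq (nodes : List (Int × Int)) (v : Int × Int) :
    ((nodes.foldl (fun d node =>
      pvDirs.foldl (fun d dd =>
        d.insert (node.1 + dd.1, node.2 + dd.2)
          (d.getD (node.1 + dd.1, node.2 + dd.2) 0 + 1)) d)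
      (PySem.Dict.empty : PySem.Dict (Int × Int) Int)).getD v 0)
    = ((nodes.flatMap pvShifts).count v : Int) := by
  rw [pv_incidence_eq, PySem.Dict.getD_foldl_insert_add_one]
  simp [PySem.Dict.empty, PySem.Dict.getD, PySem.Dict.get?]

-- ===== VERDICT (by name: the statement is the Claim_ definition above) =====
theorem nodes_to_remove_spec : Claim_equal_nodes_to_remove := by
  intro nodes _ hpre
  unfold Spec_nodes_to_remove
  simp only [nodes_to_remove, nodes_to_remove_alt]
  refine PySem.List.foldl_congr_mem _ _ _ _ ?_
  intro acc node hmem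
  rw [pv_bcount_eq, pv_count_flatMap nodes node hpre, ← pv_acount_eq]
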